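-- pv_equiv track=rewrite | github.com/fadiga/mstock | tools/export_pdf2.py | controle_caratere
-- ===== SOURCE A (Python) =====
-- def controle_caratere(lettre, nb_controle, nb_limite):
--     """
--         cette fonction decoupe une chaine de caratere en fonction
--         du nombre de caratere donnée et conduit le reste à la ligne
--     """
--     lettre = lettre
--     if len(lettre) <= nb_controle:
--         ch = lettre
--         ch2 = u""
--         return ch, ch2
--     else:
--         ch = ch2 = u""
--         for n in lettre.split(u" "):
--             if len(ch) <= nb_limite:
--                 ch = ch + u" " + n
--             else:
--                 ch2 = ch2 + u" " + n
--         return ch, ch2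
-- ===== SOURCE B (Python) =====
-- def controle_caratere(lettre, nb_controle, nb_limite):
--     if len(lettre) <= nb_controle:
--         return lettre, u""
--     words = lettre.split(u" ")
--     k = 0
--     running = 0
--     for w in words:
--         if running <= nb_limite:
--             running += 1 + len(w)
--             k += 1
--         else:
--             break
--     ch = u"".join(u" " + w for w in words[:k])
--     ch2 = u"".join(u" " + w for w in words[k:])
--     return ch, ch2
-- ===== Notes on version B (the rewrite author's own statement) =====
-- stated objective: alternative
-- what changed: B separates the decision from the construction: one pass over the words computes the split index (tracking the running prefix length arithmetically), and the two result lines are then built with joins over words[:k] and words[k:], instead of A's loop that interleaves the length test with string concatenation into two accumulators.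
import Mathlib
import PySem

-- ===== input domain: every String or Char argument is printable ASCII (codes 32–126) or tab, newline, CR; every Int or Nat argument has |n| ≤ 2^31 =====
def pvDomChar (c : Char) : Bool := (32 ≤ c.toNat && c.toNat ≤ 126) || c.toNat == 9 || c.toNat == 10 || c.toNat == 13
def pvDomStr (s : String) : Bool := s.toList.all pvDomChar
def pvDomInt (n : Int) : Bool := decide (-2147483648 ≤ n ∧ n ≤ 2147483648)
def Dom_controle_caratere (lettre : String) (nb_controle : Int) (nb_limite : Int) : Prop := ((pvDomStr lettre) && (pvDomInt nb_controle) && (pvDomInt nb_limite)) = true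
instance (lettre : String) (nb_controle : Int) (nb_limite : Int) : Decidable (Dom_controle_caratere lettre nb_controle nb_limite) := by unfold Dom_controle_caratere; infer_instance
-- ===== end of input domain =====

-- B separates the split decision (one index scan over the words) from building the two lines (two joins); alternative structure, same results.

-- ===== PORT A =====
def controle_caratere (lettre : String) (nb_controle : Int) (nb_limite : Int) : String × String :=
  if PySem.Str.len lettre ≤ nb_controle then (lettre, "")
  else
    -- lettre.split(u" "): sep " " ≠ "", so Str.split? is always `some`; `.getD []` is exact here
    ((PySem.Str.split? lettre " ").getD []).foldl
      (fun p n => if PySem.Str.len p.1 ≤ nb_limite then (p.1 ++ " " ++ n, p.2) else (p.1, p.2 ++ " " ++ n))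
      ("", "")

-- ===== PORT B =====
-- B's index scan: `k`/`running` loop of Source B (running += 1 + len(w); k += 1 while running <= nb_limite)
def bSplitIdx (nb_limite : Int) : Int → List String → Nat
  | _, [] => 0
  | running, w :: ws =>
      if running ≤ nb_limite then bSplitIdx nb_limite (running + 1 + PySem.Str.len w) ws + 1 else 0

def controle_caratere_alt (lettre : String) (nb_controle : Int) (nb_limite : Int) : String × String :=
  if PySem.Str.len lettre ≤ nb_controle then (lettre, "")
  else
    let words := (PySem.Str.split? lettre " ").getD []   -- sep " " ≠ "": `.getD []` is exact
    let k := bSplitIdx nb_limite 0 words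
    (PySem.Str.join "" ((words.take k).map (fun w => " " ++ w)),
     PySem.Str.join "" ((words.drop k).map (fun w => " " ++ w)))

-- ===== PRECONDITION & SPEC =====
def Spec_controle_caratere (lettre : String) (nb_controle : Int) (nb_limite : Int) (out : String × String) : Prop := out = controle_caratere_alt lettre nb_controle nb_limite
instance (lettre : String) (nb_controle : Int) (nb_limite : Int) (out : String × String) : Decidable (Spec_controle_caratere lettre nb_controle nb_limite out) := by unfold Spec_controle_caratere; infer_instance

-- ===== CLAIM (what is proved, stated in full; the proofs are below) =====
def Claim_equal_controle_caratere : Prop := ∀ (lettre : String) (nb_controle : Int) (nb_limite : Int), Dom_controle_caratere lettre nb_controle nb_limite → Spec_controle_caratere lettre nb_controle nb_limite (controle_caratere lettre nb_controle nb_limite)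

-- ===== LEMMAS AND PROOFS =====

lemma strJoin_empty_nil : PySem.Str.join "" ([] : List String) = "" := rfl

lemma strJoin_empty_cons (x : String) (xs : List String) :
    PySem.Str.join "" (x :: xs) = x ++ PySem.Str.join "" xs := by
  cases xs with
  | nil => simp [PySem.Str.join, PySem.Chars.join_singleton]
  | cons y ys => simp [PySem.Str.join, PySem.Chars.join_cons_cons]

lemma bSplitIdx_of_gt (nb_limite running : Int) (h : nb_limite < running) (ws : List String) :
    bSplitIdx nb_limite running ws = 0 := by
  cases ws with
  | nil => rfl
  | cons w ws => simp [bSplitIdx, not_le.mpr h]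

lemma len_snoc (ch w : String) :
    PySem.Str.len (ch ++ " " ++ w) = PySem.Str.len ch + 1 + PySem.Str.len w := by
  simp; omega

lemma fold_split (nb_limite : Int) (ws : List String) : ∀ ch ch2 : String,
    ws.foldl (fun p n => if PySem.Str.len p.1 ≤ nb_limite then (p.1 ++ " " ++ n, p.2) else (p.1, p.2 ++ " " ++ n)) (ch, ch2)
    = (ch ++ PySem.Str.join "" ((ws.take (bSplitIdx nb_limite (PySem.Str.len ch) ws)).map (fun w => " " ++ w)),
       ch2 ++ PySem.Str.join "" ((ws.drop (bSplitIdx nb_limite (PySem.Str.len ch) ws)).map (fun w => " " ++ w))) := by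
  induction ws with
  | nil =>
      intro ch ch2
      simp [bSplitIdx, strJoin_empty_nil]
  | cons w ws ih =>
      intro ch ch2
      by_cases h : PySem.Str.len ch ≤ nb_limite
      · simp only [List.foldl_cons, if_pos h]
        rw [ih, len_snoc]
        rw [show bSplitIdx nb_limite (PySem.Str.len ch) (w :: ws)
            = bSplitIdx nb_limite (PySem.Str.len ch + 1 + PySem.Str.len w) ws + 1 from by
          simp only [bSplitIdx, if_pos h]]
        simp [List.take_succ_cons, List.drop_succ_cons, strJoin_empty_cons, String.append_assoc]
      · simp only [List.foldl_cons, if_neg h]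
        rw [ih]
        rw [bSplitIdx_of_gt nb_limite _ (not_le.mp h) ws,
            bSplitIdx_of_gt nb_limite _ (not_le.mp h) (w :: ws)]
        simp [strJoin_empty_nil, strJoin_empty_cons, String.append_assoc]

-- ===== VERDICT (by name: the statement is the Claim_ definition above) =====
theorem controle_caratere_spec : Claim_equal_controle_caratere := by
  intro lettre nb_controle nb_limite _
  unfold Spec_controle_caratere controle_caratere controle_caratere_alt
  split_ifs with h
  · rfl
  · have hf := fold_split nb_limite ((PySem.Str.split? lettre " ").getD []) "" ""
    simpa using hf
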